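-- pv_equiv track=rewrite | github.com/dhalads/ds730 | p01/p1/mapper2.py | get_vowels
-- ===== SOURCE A (Python) =====
-- def get_vowels(Word):
--     vlist = ("a", "e", "i", "o", "u", "y")
--     output = ""
--     for vowel in vlist:
--         count = Word.count(vowel)
--         for i in range(0, count):
--             output = output + vowel
--     if(len(output) == 0):
--         output = ""
--     return output
-- ===== SOURCE B (Python) =====
-- def get_vowels(Word):
--     return ''.join(sorted(c for c in Word if c in "aeiouy"))
-- ===== Notes on version B (the rewrite author's own statement) =====
-- stated objective: simpler
-- what changed: Replaces A's six repeated Word.count scans and per-vowel bucketed emission with a single filter pass over Word followed by a sort-and-join; the orders agree because A's fixed vowel order a,e,i,o,u,y is alphabetical.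
import Mathlib
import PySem

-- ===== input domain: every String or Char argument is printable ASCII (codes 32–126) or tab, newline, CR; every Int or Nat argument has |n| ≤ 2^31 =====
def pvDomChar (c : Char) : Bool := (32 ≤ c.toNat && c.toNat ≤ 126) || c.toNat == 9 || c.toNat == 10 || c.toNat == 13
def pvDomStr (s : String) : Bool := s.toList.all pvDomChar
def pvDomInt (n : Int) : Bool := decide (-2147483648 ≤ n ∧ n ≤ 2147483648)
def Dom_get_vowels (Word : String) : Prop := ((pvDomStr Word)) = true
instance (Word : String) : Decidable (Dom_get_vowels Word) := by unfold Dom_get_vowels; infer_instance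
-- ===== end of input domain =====

-- B replaces A's six repeated vowel-count scans and bucketed emission with one filter pass, sort and join (simpler; same results since a,e,i,o,u,y is alphabetical).


-- ===== PORT A =====
-- literal port of A on the character-list side (Python str ops via PySem.Chars)
def get_vowels (Word : String) : String :=
  let vlist : List Char := ['a', 'e', 'i', 'o', 'u', 'y']
  let output : List Char :=
    vlist.foldl (fun output vowel =>
      let count := PySem.Chars.count Word.toList [vowel]
      (PySem.List.pyRange 0 (count : Int)).foldl (fun output _ => output ++ [vowel]) output) []
  let output := if output.length = 0 then [] else output
  String.ofList output

-- ===== PORT B =====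
-- ''.join(sorted(c for c in Word if c in "aeiouy")); for a single character c,
-- `c in "aeiouy"` is exactly character membership in its characters.
def get_vowels_alt (Word : String) : String :=
  String.ofList (PySem.List.sorted
    (Word.toList.filter (fun c => decide (c ∈ ['a', 'e', 'i', 'o', 'u', 'y'])))
    (fun c => c))

-- ===== PRECONDITION & SPEC =====
def Spec_get_vowels (Word : String) (out : String) : Prop := out = get_vowels_alt Word
instance (Word : String) (out : String) : Decidable (Spec_get_vowels Word out) := by unfold Spec_get_vowels; infer_instance

-- ===== CLAIM (what is proved, stated in full; the proofs are below) =====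
def Claim_equal_get_vowels : Prop := ∀ (Word : String), Dom_get_vowels Word → Spec_get_vowels Word (get_vowels Word)

-- ===== LEMMAS AND PROOFS =====

-- Chars.count with a single-character needle is List.count.
theorem chars_count_singleton (c : Char) (l : List Char) :
    PySem.Chars.count l [c] = l.count c := by
  have go : ∀ (fuel : Nat) (s : List Char) (acc : Nat), s.length ≤ fuel →
      PySem.Chars.count.go [c] fuel s acc = acc + s.count c := by
    intro fuel
    induction fuel with
    | zero => intro s acc h
              cases s with
              | nil => simp [PySem.Chars.count.go]
              | cons a t => simp at h
    | succ n ih =>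
      intro s acc h
      cases s with
      | nil => simp [PySem.Chars.count.go]
      | cons a t =>
        by_cases hc : c = a
        · subst hc
          simp [PySem.Chars.count.go, List.isPrefixOf, ih t (acc + 1) (by simpa using h)]
          omega
        · simp [PySem.Chars.count.go, List.isPrefixOf, hc,
                ih t acc (by simpa using h), Ne.symm hc]
  simp [PySem.Chars.count, go l.length l 0 le_rfl]

-- appending a constant once per element of a list
theorem foldl_append_const (v : Char) (l : List Int) (o : List Char) :
    l.foldl (fun o _ => o ++ [v]) o = o ++ List.replicate l.length v := by
  induction l generalizing o with
  | nil => simp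
  | cons a t ih =>
    rw [List.foldl_cons, ih, List.append_assoc, List.length_cons, List.replicate_succ]
    rfl

theorem inner_loop (v : Char) (n : Nat) (o : List Char) :
    (PySem.List.pyRange 0 (n : Int)).foldl (fun o _ => o ++ [v]) o = o ++ List.replicate n v := by
  rw [foldl_append_const]
  simp [PySem.List.pyRange_zero_natCast]

-- A's accumulated output is a permutation of B's filtered characters
theorem big_perm (l : List Char) :
    (List.replicate (l.count 'a') 'a' ++ List.replicate (l.count 'e') 'e' ++
     List.replicate (l.count 'i') 'i' ++ List.replicate (l.count 'o') 'o' ++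
     List.replicate (l.count 'u') 'u' ++ List.replicate (l.count 'y') 'y').Perm
    (l.filter (fun c => decide (c ∈ ['a', 'e', 'i', 'o', 'u', 'y']))) := by
  rw [List.perm_iff_count]
  intro c
  by_cases hc : c ∈ ['a', 'e', 'i', 'o', 'u', 'y']
  · rw [List.count_filter (p := fun c => decide (c ∈ ['a', 'e', 'i', 'o', 'u', 'y']))
        (decide_eq_true hc)]
    fin_cases hc <;> simp [List.count_append, List.count_replicate]
  · have h0 : List.count c (l.filter (fun c => decide (c ∈ ['a', 'e', 'i', 'o', 'u', 'y']))) = 0 := by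
      rw [List.count_eq_zero]
      intro hmem
      exact hc (by simpa using (List.mem_filter.mp hmem).2)
    rw [h0]
    simp only [List.mem_cons, List.not_mem_nil, or_false] at hc
    push Not at hc
    obtain ⟨h1, h2, h3, h4, h5, h6⟩ := hc
    simp [List.count_append, List.count_replicate,
          Ne.symm h1, Ne.symm h2, Ne.symm h3, Ne.symm h4, Ne.symm h5, Ne.symm h6]

theorem rep_pairwise (v : Char) (n : Nat) :
    (List.replicate n v).Pairwise (fun a b => a ≤ b) := by
  induction n with
  | zero => simp
  | succ m ih =>
    rw [List.replicate_succ]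
    exact List.Pairwise.cons (fun b hb => le_of_eq (List.eq_of_mem_replicate hb).symm) ih

theorem rep_append_pairwise (v : Char) (n : Nat) (l : List Char)
    (hl : l.Pairwise (fun a b => a ≤ b)) (hv : ∀ b ∈ l, v ≤ b) :
    (List.replicate n v ++ l).Pairwise (fun a b => a ≤ b) := by
  rw [List.pairwise_append]
  exact ⟨rep_pairwise v n, hl, fun a ha b hb => (List.eq_of_mem_replicate ha) ▸ hv b hb⟩

theorem big_pairwise (n1 n2 n3 n4 n5 n6 : Nat) :
    (List.replicate n1 'a' ++ List.replicate n2 'e' ++ List.replicate n3 'i' ++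
     List.replicate n4 'o' ++ List.replicate n5 'u' ++ List.replicate n6 'y').Pairwise
      (fun a b => a ≤ b) := by
  simp only [List.append_assoc]
  refine rep_append_pairwise _ _ _
    (rep_append_pairwise _ _ _
      (rep_append_pairwise _ _ _
        (rep_append_pairwise _ _ _
          (rep_append_pairwise _ _ _ (rep_pairwise _ _) ?_) ?_) ?_) ?_) ?_ <;>
    intro b hb <;> simp only [List.mem_append, List.mem_replicate] at hb
  · rcases hb with ⟨-, rfl⟩; decide
  · rcases hb with ⟨-, rfl⟩ | ⟨-, rfl⟩ <;> decide
  · rcases hb with ⟨-, rfl⟩ | ⟨-, rfl⟩ | ⟨-, rfl⟩ <;> decide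
  · rcases hb with ⟨-, rfl⟩ | ⟨-, rfl⟩ | ⟨-, rfl⟩ | ⟨-, rfl⟩ <;> decide
  · rcases hb with ⟨-, rfl⟩ | ⟨-, rfl⟩ | ⟨-, rfl⟩ | ⟨-, rfl⟩ | ⟨-, rfl⟩ <;> decide

-- ===== VERDICT (by name: the statement is the Claim_ definition above) =====
theorem get_vowels_spec : Claim_equal_get_vowels := by
  intro Word _
  unfold Spec_get_vowels get_vowels get_vowels_alt
  simp only [List.foldl_cons, List.foldl_nil, chars_count_singleton, inner_loop, List.nil_append]
  rw [PySem.List.sorted_id_eq_of_perm_of_pairwise _ _ (big_perm Word.toList)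
      (big_pairwise _ _ _ _ _ _)]
  split_ifs with h
  · rw [List.length_eq_zero_iff] at h
    rw [h]
  · rfl
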